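-- pv_equiv track=rewrite | github.com/kasperallais/class | algo/flowers/2/main.py | max_beauty_dp
-- ===== SOURCE A (Python) =====
-- def max_beauty_dp(flowers):
--     n = len(flowers)
--     # Precompute prefix sums
--     prefix = [0] * (n + 1)
--     for i in range(1, n + 1):
--         prefix[i] = prefix[i - 1] + flowers[i - 1]
--
--     # Get sum of interval [i, j]
--     def total(i, j):
--         return prefix[j + 1] - prefix[i]
--
--     # Initialize DP table
--     dp = [[0] * n for _ in range(n)]
--
--     # Base cases: one flower intervals
--     for i in range(n):
--         dp[i][i] = flowers[i]
--
--     # Build the table for intervals of increasing lengths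
--     # L is the length of the interval
--     for L in range(2, n + 1):
--         for i in range(n - L + 1):
--             j = i + L - 1
--             # Recurrence relation: total beauty from i to j minus the best the opponent can obtain
--             dp[i][j] = total(i, j) - min(dp[i+1][j], dp[i][j-1])
--
--     return dp[0][n - 1]
-- ===== SOURCE B (Python) =====
-- def max_beauty_dp(flowers):
--     n = len(flowers)
--     prefix = [0]
--     for x in flowers:
--         prefix.append(prefix[-1] + x)
--     memo = {}
--
--     def solve(i, j):
--         if i == j:
--             return flowers[i]
--         if (i, j) not in memo:
--             memo[(i, j)] = (prefix[j + 1] - prefix[i]) - min(solve(i + 1, j), solve(i, j - 1))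
--         return memo[(i, j)]
--
--     return solve(0, n - 1)
-- ===== Notes on version B (the rewrite author's own statement) =====
-- stated objective: alternative
-- what changed: Bottom-up length-indexed DP table replaced by top-down memoized recursion solve(i,j) over subintervals, with the prefix-sum array built by a running-sum append instead of indexed assignment.
import Mathlib
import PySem

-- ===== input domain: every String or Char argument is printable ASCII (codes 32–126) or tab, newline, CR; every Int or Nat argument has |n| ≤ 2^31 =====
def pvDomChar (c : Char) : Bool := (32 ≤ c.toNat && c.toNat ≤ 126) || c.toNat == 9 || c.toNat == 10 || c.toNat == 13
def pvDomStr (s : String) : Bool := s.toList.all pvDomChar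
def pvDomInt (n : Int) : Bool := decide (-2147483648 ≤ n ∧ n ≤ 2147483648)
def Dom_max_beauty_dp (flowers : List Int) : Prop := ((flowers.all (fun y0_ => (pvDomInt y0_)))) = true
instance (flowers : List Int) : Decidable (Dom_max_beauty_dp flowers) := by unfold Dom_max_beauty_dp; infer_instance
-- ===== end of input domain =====

-- B replaces A's bottom-up length-indexed DP table by top-down recursion over subintervals
-- (memoized in Python; the memo is value-transparent, so the Lean port is the plain recursion).


-- ===== PORT A =====
-- literal transliteration of A: prefix sums by indexed assignment, then a bottom-up
-- n×n table filled by interval length L, answer dp[0][n-1].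
def max_beauty_dp (flowers : List Int) : Int :=
  let n : Int := PySem.List.len flowers
  let prefx : List Int :=
    (PySem.List.pyRange 1 (n + 1) 1).foldl
      (fun p i =>
        PySem.List.pySetD p i (PySem.List.pyGetD p (i - 1) 0 + PySem.List.pyGetD flowers (i - 1) 0))
      (List.replicate (n + 1).toNat 0)
  let total : Int → Int → Int := fun i j =>
    PySem.List.pyGetD prefx (j + 1) 0 - PySem.List.pyGetD prefx i 0
  let dp0 : List (List Int) :=
    (PySem.List.pyRange 0 n 1).map (fun _ => List.replicate n.toNat 0)
  let dp1 : List (List Int) :=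
    (PySem.List.pyRange 0 n 1).foldl
      (fun dp i =>
        PySem.List.pySetD dp i
          (PySem.List.pySetD (PySem.List.pyGetD dp i []) i (PySem.List.pyGetD flowers i 0)))
      dp0
  let dp2 : List (List Int) :=
    (PySem.List.pyRange 2 (n + 1) 1).foldl
      (fun dp L =>
        (PySem.List.pyRange 0 (n - L + 1) 1).foldl
          (fun dp i =>
            let j := i + L - 1
            PySem.List.pySetD dp i
              (PySem.List.pySetD (PySem.List.pyGetD dp i []) j
                (total i j -
                  min (PySem.List.pyGetD (PySem.List.pyGetD dp (i + 1) []) j 0)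
                      (PySem.List.pyGetD (PySem.List.pyGetD dp i []) (j - 1) 0))))
          dp)
      dp1
  PySem.List.pyGetD (PySem.List.pyGetD dp2 0 []) (n - 1) 0

-- ===== PORT B =====
-- recursive descent solve(i, j); fuel = j - i bounds the recursion depth (the Python
-- recursion terminates because j - i strictly decreases; the memo dict only caches values).
def pvAltSolve (flowers prefx : List Int) : Nat → Nat → Nat → Int
  | i, _, 0 => flowers.getD i 0
  | i, j, fuel + 1 =>
    if i = j then flowers.getD i 0
    else
      (prefx.getD (j + 1) 0 - prefx.getD i 0) -
        min (pvAltSolve flowers prefx (i + 1) j fuel) (pvAltSolve flowers prefx i (j - 1) fuel)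

def max_beauty_dp_alt (flowers : List Int) : Int :=
  let n := flowers.length
  let prefx : List Int := flowers.foldl (fun p x => p ++ [PySem.List.pyGetD p (-1) 0 + x]) [0]
  pvAltSolve flowers prefx 0 (n - 1) (n - 1)

-- ===== PRECONDITION & SPEC =====
-- Pre_ excludes only the empty list, on which A raises IndexError (dp[0][n-1] on an empty table).
def Pre_max_beauty_dp (flowers : List Int) : Prop := flowers ≠ []
instance (flowers : List Int) : Decidable (Pre_max_beauty_dp flowers) := by
  unfold Pre_max_beauty_dp; infer_instance
def pvWitness_max_beauty_dp : List Int := [3, 1, 5, 2]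

def Spec_max_beauty_dp (flowers : List Int) (out : Int) : Prop := out = max_beauty_dp_alt flowers
instance (flowers : List Int) (out : Int) : Decidable (Spec_max_beauty_dp flowers out) := by
  unfold Spec_max_beauty_dp; infer_instance

-- ===== CLAIM (what is proved, stated in full; the proofs are below) =====
def Claim_equal_max_beauty_dp : Prop := ∀ (flowers : List Int), Dom_max_beauty_dp flowers → Pre_max_beauty_dp flowers → Spec_max_beauty_dp flowers (max_beauty_dp flowers)

-- ===== LEMMAS AND PROOFS =====

-- running prefix scan: pvScan s xs = [s+x1, s+x1+x2, …]
def pvScan : Int → List Int → List Int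
  | _, [] => []
  | s, x :: xs => (s + x) :: pvScan (s + x) xs

-- the common prefix-sum list both programs build
def pvP (xs : List Int) : List Int := 0 :: pvScan 0 xs

-- the game value of interval [i, j] (B's recursion with exact fuel)
def pvG (xs : List Int) (i j : Nat) : Int := pvAltSolve xs (pvP xs) i j (j - i)

-- an n×n table given by an entry function
def pvTab (n : Nat) (e : Nat → Nat → Int) : List (List Int) :=
  (List.range n).map (fun i => (List.range n).map (e i))

theorem pvMapRange_set {α : Type} (f : Nat → α) (n j : Nat) (v : α) :
    ((List.range n).map f).set j v
      = (List.range n).map (fun k => if k = j then v else f k) := by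
  apply List.ext_getElem?
  intro k
  by_cases hk : k < n
  · by_cases hkj : j = k
    · subst hkj; simp [hk]
    · simp [hk, hkj, Ne.symm hkj]
  · simp [hk]

theorem pvFoldRange {α : Type} (a : Int) (c : Nat) (f : α → Int → α) (init : α)
    (motive : Nat → α → Prop) (h0 : motive 0 init)
    (hs : ∀ (m : Nat) (s : α), m < c → motive m s → motive (m + 1) (f s (a + m))) :
    motive c ((PySem.List.pyRange a (a + c) 1).foldl f init) := by
  induction c with
  | zero =>
    simpa [PySem.List.pyRange_one_eq_nil (le_refl a)] using h0
  | succ k ih =>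
    have hb : PySem.List.pyRange a (a + ((k : Nat) + 1 : Nat)) 1
        = PySem.List.pyRange a (a + k) 1 ++ [a + k] := by
      rw [show ((a : Int) + ((k : Nat) + 1 : Nat)) = (a + (k : Int)) + 1 by push_cast; ring]
      exact PySem.List.pyRange_one_succ_right (by omega)
    rw [hb, List.foldl_append, List.foldl_cons, List.foldl_nil]
    exact hs k _ (by omega) (ih (fun m s hm => hs m s (by omega)))


theorem pvScan_length (s : Int) (xs : List Int) : (pvScan s xs).length = xs.length := by
  induction xs generalizing s with
  | nil => rfl
  | cons x xs ih => simp [pvScan, ih]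

theorem pvP_length (xs : List Int) : (pvP xs).length = xs.length + 1 := by
  simp [pvP, pvScan_length]

theorem pvScan_rel (xs : List Int) : ∀ (s : Int) (k : Nat), k < xs.length →
    (s :: pvScan s xs).getD (k + 1) 0 = (s :: pvScan s xs).getD k 0 + xs.getD k 0 := by
  induction xs with
  | nil => intro s k hk; simp at hk
  | cons x xs ih =>
    intro s k hk
    cases k with
    | zero => simp [pvScan]
    | succ k => simpa [pvScan] using ih (s + x) k (by simpa using hk)

theorem pvP_getD_succ (xs : List Int) (k : Nat) (hk : k < xs.length) :
    (pvP xs).getD (k + 1) 0 = (pvP xs).getD k 0 + xs.getD k 0 :=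
  pvScan_rel xs 0 k hk

theorem pvB_fold (xs : List Int) : ∀ (acc : List Int) (h : acc ≠ []),
    xs.foldl (fun p x => p ++ [PySem.List.pyGetD p (-1) 0 + x]) acc
      = acc ++ pvScan (acc.getLast h) xs := by
  induction xs with
  | nil => intro acc h; simp [pvScan]
  | cons x xs ih =>
    intro acc h
    simp only [List.foldl_cons, PySem.List.pyGetD_neg_one acc 0 h]
    rw [ih (acc ++ [acc.getLast h + x]) (by simp)]
    simp [pvScan]

theorem pvAlt_eq (xs : List Int) :
    max_beauty_dp_alt xs = pvAltSolve xs (pvP xs) 0 (xs.length - 1) (xs.length - 1) := by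
  unfold max_beauty_dp_alt
  rw [pvB_fold xs [0] (by simp)]
  rfl

theorem pvG_base (xs : List Int) (i : Nat) : pvG xs i i = xs.getD i 0 := by
  simp [pvG, pvAltSolve]

theorem pvG_rec (xs : List Int) (i j : Nat) (hij : i < j) :
    pvG xs i j = ((pvP xs).getD (j + 1) 0 - (pvP xs).getD i 0)
      - min (pvG xs (i + 1) j) (pvG xs i (j - 1)) := by
  obtain ⟨d, hd⟩ : ∃ d, j - i = d + 1 := ⟨j - i - 1, by omega⟩
  unfold pvG
  rw [hd]
  have h1 : j - (i + 1) = d := by omega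
  have h2 : j - 1 - i = d := by omega
  rw [pvAltSolve, if_neg (by omega), h1, h2]

theorem pvTab_getD {n : Nat} (e : Nat → Nat → Int) {i j : Nat} (hi : i < n) (hj : j < n) :
    ((pvTab n e).getD i []).getD j 0 = e i j := by
  simp [pvTab, List.getD_eq_getElem?_getD, hi, hj]

theorem pvTab_set {n : Nat} (e : Nat → Nat → Int) {i j : Nat} (hi : i < n) (_hj : j < n) (v : Int) :
    (pvTab n e).set i (((pvTab n e).getD i []).set j v)
      = pvTab n (fun i' j' => if i' = i ∧ j' = j then v else e i' j') := by
  have hrow : (pvTab n e).getD i [] = (List.range n).map (e i) := by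
    simp [pvTab, List.getD_eq_getElem?_getD, hi]
  rw [hrow]
  unfold pvTab
  rw [pvMapRange_set (e i) n j v]
  rw [show ((List.range n).map (fun i' => (List.range n).map (e i'))).set i
        ((List.range n).map fun k => if k = j then v else e i k)
      = ((List.range n).map (fun i' => if i' = i then ((List.range n).map fun k => if k = j then v else e i k) else (List.range n).map (e i')))
    from pvMapRange_set _ n i _]
  apply List.map_congr_left
  intro i' _
  by_cases hii : i' = i
  · subst hii
    simp only []
    apply List.map_congr_left
    intro j' _
    by_cases hjj : j' = j <;> simp [hjj]
  · simp only [if_neg hii]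
    apply List.map_congr_left
    intro j' _
    simp [hii]

-- A's prefix loop computes pvP
theorem pvA_prefix (xs : List Int) :
    (PySem.List.pyRange 1 ((xs.length : Int) + 1) 1).foldl
      (fun p i =>
        PySem.List.pySetD p i (PySem.List.pyGetD p (i - 1) 0 + PySem.List.pyGetD xs (i - 1) 0))
      (List.replicate ((xs.length : Int) + 1).toNat 0) = pvP xs := by
  have hlen := pvP_length xs
  rw [show ((xs.length : Int) + 1) = 1 + (xs.length : Int) from by ring]
  have := pvFoldRange (α := List Int) 1 xs.length
    (fun p i =>
      PySem.List.pySetD p i (PySem.List.pyGetD p (i - 1) 0 + PySem.List.pyGetD xs (i - 1) 0))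
    (List.replicate ((1 : Int) + (xs.length : Int)).toNat 0)
    (fun m p => p = (pvP xs).take (m + 1) ++ List.replicate (xs.length - m) 0)
    (by
      simp only []
      have h1 : ((1 : Int) + (xs.length : Int)).toNat = xs.length + 1 := by omega
      rw [h1]
      rw [show (pvP xs).take 1 = [0] from by simp [pvP]]
      simp [List.replicate_succ])
    (by
      intro m p hm hp
      simp only []
      have hc : (1 : Int) + (m : Nat) = ((m + 1 : Nat) : Int) := by push_cast; ring
      have hc' : ((m + 1 : Nat) : Int) - 1 = ((m : Nat) : Int) := by push_cast; ring
      rw [hc, hc', PySem.List.pySetD_natCast, PySem.List.pyGetD_natCast, PySem.List.pyGetD_natCast]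
      rw [hp]
      have hget : ((pvP xs).take (m + 1) ++ List.replicate (xs.length - m) 0).getD m 0
          = (pvP xs).getD m 0 := by
        rw [List.getD_append _ _ _ m (by simp [List.length_take]; omega)]
        simp [List.getD_eq_getElem?_getD]
      rw [hget, ← pvP_getD_succ xs m hm]
      have hltake : ((pvP xs).take (m + 1)).length = m + 1 := by
        simp [List.length_take]; omega
      rw [List.set_append, if_neg (by rw [hltake]; omega)]
      rw [hltake, show m + 1 - (m + 1) = 0 from by omega]
      rw [show xs.length - m = (xs.length - (m + 1)) + 1 from by omega, List.replicate_succ,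
        List.set_cons_zero]
      have hsome : (pvP xs)[m + 1]? = some ((pvP xs).getD (m + 1) 0) := by
        rw [List.getD_eq_getElem?_getD, List.getElem?_eq_getElem (by omega)]
        simp
      conv_rhs => rw [show m + 1 + 1 = (m + 1) + 1 from rfl, List.take_add_one, hsome]
      simp)
  rw [this]
  rw [List.take_of_length_le (by omega)]
  simp


theorem pvDP0 (xs : List Int) :
    (PySem.List.pyRange 0 (xs.length : Int) 1).map
        (fun _ => List.replicate ((xs.length : Int)).toNat 0)
      = pvTab xs.length (fun _ _ => 0) := by
  rw [PySem.List.pyRange_zero_nat]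
  simp only [pvTab, List.map_map, Int.toNat_natCast]
  simp [Function.comp_def, List.map_const', List.length_range]

theorem pvDP1 (xs : List Int) :
    ∃ e, (PySem.List.pyRange 0 (xs.length : Int) 1).foldl
        (fun dp i => PySem.List.pySetD dp i
          (PySem.List.pySetD (PySem.List.pyGetD dp i []) i (PySem.List.pyGetD xs i 0)))
        (pvTab xs.length (fun _ _ => 0))
      = pvTab xs.length e ∧ ∀ i < xs.length, e i i = pvG xs i i := by
  rw [show ((xs.length : Nat) : Int) = 0 + ((xs.length : Nat) : Int) from by ring]
  have H := pvFoldRange (α := List (List Int)) 0 xs.length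
    (fun dp i => PySem.List.pySetD dp i
      (PySem.List.pySetD (PySem.List.pyGetD dp i []) i (PySem.List.pyGetD xs i 0)))
    (pvTab xs.length (fun _ _ => 0))
    (fun m dp => ∃ e, dp = pvTab xs.length e ∧ ∀ i < m, e i i = pvG xs i i)
    ⟨fun _ _ => 0, rfl, by omega⟩
    (by
      intro m dp hm hdp
      obtain ⟨e, rfl, he⟩ := hdp
      simp only [zero_add, PySem.List.pyGetD_natCast, PySem.List.pySetD_natCast]
      rw [pvTab_set e hm hm]
      refine ⟨_, rfl, ?_⟩
      intro i hi
      by_cases hik : i = m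
      · subst hik
        rw [if_pos ⟨rfl, rfl⟩, pvG_base]
      · rw [if_neg (by tauto)]
        exact he i (by omega))
  obtain ⟨e, h1, h2⟩ := H
  exact ⟨e, h1, h2⟩

theorem pvDP2 (xs : List Int) (hn : 1 ≤ xs.length) (e1 : Nat → Nat → Int)
    (he1 : ∀ i < xs.length, e1 i i = pvG xs i i) :
    ∃ e, (PySem.List.pyRange 2 ((xs.length : Int) + 1) 1).foldl
        (fun dp L =>
          (PySem.List.pyRange 0 ((xs.length : Int) - L + 1) 1).foldl
            (fun dp i =>
              PySem.List.pySetD dp i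
                (PySem.List.pySetD (PySem.List.pyGetD dp i []) (i + L - 1)
                  (PySem.List.pyGetD (pvP xs) (i + L - 1 + 1) 0 - PySem.List.pyGetD (pvP xs) i 0 -
                    min (PySem.List.pyGetD (PySem.List.pyGetD dp (i + 1) []) (i + L - 1) 0)
                      (PySem.List.pyGetD (PySem.List.pyGetD dp i []) (i + L - 1 - 1) 0))))
            dp)
        (pvTab xs.length e1)
      = pvTab xs.length e ∧ ∀ i j, i ≤ j → j < xs.length → e i j = pvG xs i j := by
  rw [show ((xs.length : Int) + 1) = 2 + ((xs.length - 1 : Nat) : Int) from by omega]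
  have H := pvFoldRange (α := List (List Int)) 2 (xs.length - 1)
    (fun dp L =>
          (PySem.List.pyRange 0 ((xs.length : Int) - L + 1) 1).foldl
            (fun dp i =>
              PySem.List.pySetD dp i
                (PySem.List.pySetD (PySem.List.pyGetD dp i []) (i + L - 1)
                  (PySem.List.pyGetD (pvP xs) (i + L - 1 + 1) 0 - PySem.List.pyGetD (pvP xs) i 0 -
                    min (PySem.List.pyGetD (PySem.List.pyGetD dp (i + 1) []) (i + L - 1) 0)
                      (PySem.List.pyGetD (PySem.List.pyGetD dp i []) (i + L - 1 - 1) 0))))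
            dp)
    (pvTab xs.length e1)
    (motive := fun m dp => ∃ e, dp = pvTab xs.length e ∧
      ∀ i j, i ≤ j → j < xs.length → j - i ≤ m → e i j = pvG xs i j)
    ⟨e1, rfl, by
      intro i j h1 h2 h3
      have hij : i = j := by omega
      subst hij
      exact he1 i h2⟩
    (by
      intro m dp hm hdp
      obtain ⟨e, rfl, he⟩ := hdp
      simp only []
      rw [show (xs.length : Int) - (2 + (m : Int)) + 1 = 0 + ((xs.length - m - 1 : Nat) : Int)
        from by omega]
      have H2 := pvFoldRange (α := List (List Int)) 0 (xs.length - m - 1)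
        (fun dp i =>
          PySem.List.pySetD dp i
            (PySem.List.pySetD (PySem.List.pyGetD dp i []) (i + (2 + (m : Int)) - 1)
              (PySem.List.pyGetD (pvP xs) (i + (2 + (m : Int)) - 1 + 1) 0 -
                  PySem.List.pyGetD (pvP xs) i 0 -
                min (PySem.List.pyGetD (PySem.List.pyGetD dp (i + 1) []) (i + (2 + (m : Int)) - 1) 0)
                  (PySem.List.pyGetD (PySem.List.pyGetD dp i []) (i + (2 + (m : Int)) - 1 - 1) 0))))
        (pvTab xs.length e)
        (motive := fun k dp => ∃ e', dp = pvTab xs.length e' ∧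
          (∀ i j, i ≤ j → j < xs.length → j - i ≤ m → e' i j = pvG xs i j) ∧
          ∀ i < k, e' i (i + m + 1) = pvG xs i (i + m + 1))
        ⟨e, rfl, he, by omega⟩
        (by
          intro k dp hk hdp
          obtain ⟨e', rfl, hkeep, hnew⟩ := hdp
          simp only [zero_add]
          rw [show (k : Int) + (2 + (m : Int)) - 1 = ((k + m + 1 : Nat) : Int)
            from by push_cast; ring]
          rw [show ((k + m + 1 : Nat) : Int) + 1 = ((k + m + 2 : Nat) : Int)
            from by push_cast; ring]
          rw [show ((k + m + 1 : Nat) : Int) - 1 = ((k + m : Nat) : Int)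
            from by push_cast; ring]
          rw [show (k : Int) + 1 = ((k + 1 : Nat) : Int) from by push_cast; ring]
          simp only [PySem.List.pyGetD_natCast, PySem.List.pySetD_natCast]
          have hkn : k + m + 1 < xs.length := by omega
          rw [pvTab_getD e' (by omega) hkn, pvTab_getD e' (by omega) (by omega)]
          rw [hkeep (k + 1) (k + m + 1) (by omega) (by omega) (by omega)]
          rw [hkeep k (k + m) (by omega) (by omega) (by omega)]
          rw [show (pvP xs).getD (k + m + 2) 0 - (pvP xs).getD k 0 -
                min (pvG xs (k + 1) (k + m + 1)) (pvG xs k (k + m))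
              = pvG xs k (k + m + 1) from by
            rw [pvG_rec xs k (k + m + 1) (by omega)]
            rw [show k + m + 1 - 1 = k + m from by omega]]
          rw [pvTab_set e' (by omega) hkn]
          refine ⟨_, rfl, ?_, ?_⟩
          · intro i j hij hjn hgap
            rw [if_neg (by rintro ⟨rfl, rfl⟩; omega)]
            exact hkeep i j hij hjn hgap
          · intro i hi
            by_cases hik : i = k
            · subst hik
              rw [if_pos ⟨rfl, rfl⟩]
            · rw [if_neg (by tauto)]
              exact hnew i (by omega))
      obtain ⟨e', h1, hkeep, hnew⟩ := H2
      refine ⟨e', h1, ?_⟩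
      intro i j hij hjn hgap
      by_cases hle : j - i ≤ m
      · exact hkeep i j hij hjn hle
      · have hj' : j = i + m + 1 := by omega
        subst hj'
        exact hnew i (by omega))
  obtain ⟨e, h1, h2⟩ := H
  exact ⟨e, h1, fun i j hij hj => h2 i j hij hj (by omega)⟩

theorem pvA_eq (xs : List Int) (hne : xs ≠ []) :
    max_beauty_dp xs = pvG xs 0 (xs.length - 1) := by
  have hn : 1 ≤ xs.length := by
    cases xs with
    | nil => exact absurd rfl hne
    | cons a l => simp
  simp only [max_beauty_dp, PySem.List.len_eq]
  rw [pvA_prefix xs]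
  rw [pvDP0 xs]
  obtain ⟨e1, hdp1, he1⟩ := pvDP1 xs
  rw [hdp1]
  obtain ⟨e, hdp2, he⟩ := pvDP2 xs hn e1 he1
  rw [hdp2]
  rw [PySem.List.pyGetD_zero]
  rw [show (xs.length : Int) - 1 = ((xs.length - 1 : Nat) : Int) from by omega]
  rw [show (pvTab xs.length e).getD 0 [] = (pvTab xs.length e).getD (0 : Nat) [] from rfl]
  rw [PySem.List.pyGetD_natCast]
  rw [pvTab_getD e (by omega) (by omega)]
  exact he 0 (xs.length - 1) (by omega) (by omega)

-- ===== VERDICT (by name: the statement is the Claim_ definition above) =====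
theorem max_beauty_dp_spec : Claim_equal_max_beauty_dp := by
  intro xs _ hne
  unfold Spec_max_beauty_dp
  rw [pvA_eq xs hne, pvAlt_eq xs]
  simp [pvG]
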